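-- pv_equiv track=rewrite | github.com/CheeseLad/ca268 | week-06/jake_farrell_lab_04.py | q4
-- ===== SOURCE A (Python) =====
-- class Queue:
--     """
--     Python implementation the queue
--     """
--
--     def __init__(self):
--         self.items = []
--
--     def is_empty(self):
--         return self.items == []
--
--     def enqueue(self, item):
--         self.items.insert(0, item)
--
--     def dequeue(self):
--         return self.items.pop()
--
--     def size(self):
--         return len(self.items)
--
--     def reverse(self):
--         self.items = self.items[::-1]
--
--     def sort(self, new=[]):
--         if len(self.items) == 0:
--             return new
--         else:
--             new.append("test")
--             return
--
--     def reverse_first(self, k):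
--         self.items = self.items[k::-1]
--
--     def front(self):
--         return self.items[0]
--
-- def q4(s):
--     newlst = []
--     q4_1 = Queue()
--     for item in s:
--       if item != "*":
--           q4_1.enqueue(item)
--       elif item == "*":
--           newlst.append(q4_1.dequeue())
--     return newlst
-- ===== SOURCE B (Python) =====
-- def q4(s):
--     vals = [x for x in s if x != "*"]
--     return vals[:s.count("*")]
-- ===== Notes on version B (the rewrite author's own statement) =====
-- stated objective: simpler
-- what changed: Replaces the stateful Queue loop (insert-at-front enqueue, pop-from-end dequeue) by a closed form: since every '*' dequeues the next non-'*' item in arrival order, the result is the list of non-'*' items truncated to the number of '*' markers -- one filter plus one count, no queue state.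
import Mathlib
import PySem

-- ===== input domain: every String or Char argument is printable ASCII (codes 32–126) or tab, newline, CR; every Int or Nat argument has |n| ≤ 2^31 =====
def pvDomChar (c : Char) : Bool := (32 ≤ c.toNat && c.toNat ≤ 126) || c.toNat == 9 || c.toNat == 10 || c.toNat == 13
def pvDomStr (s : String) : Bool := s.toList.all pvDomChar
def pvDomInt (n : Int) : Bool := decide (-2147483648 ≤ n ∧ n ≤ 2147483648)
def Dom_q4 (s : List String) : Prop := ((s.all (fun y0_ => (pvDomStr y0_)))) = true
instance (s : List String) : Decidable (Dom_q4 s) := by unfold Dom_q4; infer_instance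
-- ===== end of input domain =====

-- B replaces A's stateful Queue loop by a closed form: the k-th "*" dequeues the k-th
-- non-"*" item in arrival order, so the result is the non-"*" items truncated to the
-- number of "*" markers (filter + count + slice).


-- ===== PORT A =====
-- A's loop: newlst accumulator, queue 'items' with enqueue = insert at index 0,
-- dequeue = items.pop() (pop last). pop? = none is Python's IndexError (excluded by
-- Pre_q4); the port returns the accumulator there only to stay total.
def q4A.loop : List String → List String → List String → List String
  | [], newlst, _ => newlst
  | item :: rest, newlst, items =>
    if item ≠ "*" then q4A.loop rest newlst (item :: items)
    else
      match PySem.List.pop? items with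
      | some (x, items') => q4A.loop rest (newlst ++ [x]) items'
      | none => newlst

def q4 (s : List String) : List String := q4A.loop s [] []

-- ===== PORT B =====
-- B: vals = [x for x in s if x != "*"]; return vals[:s.count("*")]
def q4_alt (s : List String) : List String :=
  let vals := s.filter (fun x => decide (x ≠ "*"))
  PySem.List.slice vals none (some ((PySem.List.count s "*" : Nat) : Int))

-- ===== PRECONDITION & SPEC =====
-- Pre_q4 holds exactly when no prefix of s contains more "*" markers than other items,
-- i.e. exactly when A's dequeue never hits an empty queue; on the excluded inputs A
-- raises IndexError.
def Pre_q4 (s : List String) : Prop :=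
  ∀ i ∈ List.range (s.length + 1), 2 * (s.take i).count "*" ≤ i
instance (s : List String) : Decidable (Pre_q4 s) := by unfold Pre_q4; infer_instance

def pvWitness_q4 : List String := ["a", "b", "*", "c", "*", "*"]

def Spec_q4 (s : List String) (out : List String) : Prop := out = q4_alt s
instance (s : List String) (out : List String) : Decidable (Spec_q4 s out) := by unfold Spec_q4; infer_instance

-- ===== CLAIM (what is proved, stated in full; the proofs are below) =====
def Claim_equal_q4 : Prop := ∀ (s : List String), Dom_q4 s → Pre_q4 s → Spec_q4 s (q4 s)

-- ===== LEMMAS AND PROOFS =====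

-- For every prefix, (# non-star items) + (# stars) = length.
lemma filter_count_len (t : List String) :
    (t.filter (fun x => decide (x ≠ "*"))).length + t.count "*" = t.length := by
  induction t with
  | nil => simp
  | cons a t ih =>
    by_cases h : a = "*" <;> simp [h, ← ih] <;> omega

-- Invariant: A's loop returns the accumulator followed by the still-queued items
-- (oldest first, i.e. items reversed) and the upcoming non-star items, truncated
-- to the number of upcoming stars — provided no prefix of 'rest' overdraws.
lemma q4A_loop_eq : ∀ (rest out items : List String),
    (∀ t, t <+: rest →
      t.count "*" ≤ items.length + (t.filter (fun x => decide (x ≠ "*"))).length) →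
    q4A.loop rest out items =
      out ++ (items.reverse ++ rest.filter (fun x => decide (x ≠ "*"))).take (rest.count "*") := by
  intro rest
  induction rest with
  | nil => intro out items _; simp [q4A.loop]
  | cons item rest ih =>
    intro out items hbal
    by_cases hstar : item = "*"
    · subst hstar
      rcases items.eq_nil_or_concat with hnil | ⟨l, x, rfl⟩
      · exfalso
        have := hbal ["*"] (List.cons_prefix_cons.mpr ⟨rfl, List.nil_prefix⟩)
        simp [hnil] at this
      · rw [List.concat_eq_append]
        have hpop : PySem.List.pop? (l ++ [x]) = some (x, l) := PySem.List.pop?_last _ _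
        simp only [q4A.loop, ne_eq, not_true_eq_false, if_false]
        rw [hpop]
        show q4A.loop rest (out ++ [x]) l = _
        rw [ih (out ++ [x]) l (by
          intro t ht
          have := hbal ("*" :: t) (List.cons_prefix_cons.mpr ⟨rfl, ht⟩)
          simp at this ⊢
          omega)]
        simp [List.count_cons]
    · simp only [q4A.loop, if_pos (by simpa using hstar)]
      rw [ih out (item :: items) (by
        intro t ht
        have := hbal (item :: t) (List.cons_prefix_cons.mpr ⟨rfl, ht⟩)
        simp [hstar] at this ⊢
        omega)]
      simp [hstar, List.append_assoc]

-- ===== VERDICT (by name: the statement is the Claim_ definition above) =====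
theorem q4_spec : Claim_equal_q4 := by
  intro s _ hpre
  unfold Spec_q4 q4 q4_alt
  rw [q4A_loop_eq s [] [] (by
    intro t ht
    have hteq : t = s.take t.length := List.prefix_iff_eq_take.mp ht
    have hlen : t.length ≤ s.length := ht.length_le
    have h2 := hpre t.length (by simp [List.mem_range]; omega)
    rw [← hteq] at h2
    have h3 := filter_count_len t
    omega)]
  simp [PySem.List.count_eq, PySem.List.slice_to_natCast]
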